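-- pv_equiv track=rewrite | github.com/aulb/notes | matrix/SumAroundRadius-nonlc.py | range_sum2
-- ===== SOURCE A (Python) =====
-- def range_sum2(matrix, r):
--   def getsum(A, m, n, x, y, r):
--       sums, start, end = 0, 0, 0
--       for i in range(max(0, x-r), min(m, x+r+1)):
--         if y > r:
--             start = A[i][max(0, y-r-1)]
--         end = A[i][min(n-1, y+r)]
--         sums += end - start
--       return sums
--
--   m = len(matrix)
--   n = len(matrix[0])
--   res = [[0] * n for _ in range(m)]
--   B = [row[:]for row in matrix]
--
--   for i in range(m):
--       for j in range(1,n):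
--         B[i][j] += B[i][j-1]
--   for i in range(m):
--       for j in range(n):
--         res[i][j] = getsum(B, m, n, i, j, r)
--   return res
-- ===== SOURCE B (Python) =====
-- def range_sum2(matrix, r):
--     m = len(matrix)
--     n = len(matrix[0])
--     # 2D prefix-sum table: P[i][j] = sum of matrix[a][b] for a < i, b < j
--     P = [[0] * (n + 1)]
--     for row in matrix:
--         prev = P[-1]
--         cur = [0]
--         for j in range(n):
--             cur.append(cur[-1] + prev[j + 1] - prev[j] + row[j])
--         P.append(cur)
--     out = []
--     for i in range(m):
--         out_row = []
--         for j in range(n):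
--             r1, r2 = max(0, i - r), min(m, i + r + 1)
--             c1, c2 = max(0, j - r), min(n, j + r + 1)
--             if r1 >= r2 or c1 >= c2:
--                 out_row.append(0)
--             else:
--                 out_row.append(P[r2][c2] - P[r1][c2] - P[r2][c1] + P[r1][c1])
--         out.append(out_row)
--     return out
-- ===== Notes on version B (the rewrite author's own statement) =====
-- stated objective: faster
-- what changed: A recomputes each cell by looping over up to 2r+1 rows and differencing per-row prefix sums; B builds one 2D prefix-sum table and answers every cell with an O(1) four-corner rectangle query.
-- outside the precondition, e.g. on range_sum2([[9], [], [-3]], -1): A returns [[0], [0], [0]], B raises IndexError; on range_sum2([[1, 2], [3]], 0): A raises IndexError, B raises IndexError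
import Mathlib
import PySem

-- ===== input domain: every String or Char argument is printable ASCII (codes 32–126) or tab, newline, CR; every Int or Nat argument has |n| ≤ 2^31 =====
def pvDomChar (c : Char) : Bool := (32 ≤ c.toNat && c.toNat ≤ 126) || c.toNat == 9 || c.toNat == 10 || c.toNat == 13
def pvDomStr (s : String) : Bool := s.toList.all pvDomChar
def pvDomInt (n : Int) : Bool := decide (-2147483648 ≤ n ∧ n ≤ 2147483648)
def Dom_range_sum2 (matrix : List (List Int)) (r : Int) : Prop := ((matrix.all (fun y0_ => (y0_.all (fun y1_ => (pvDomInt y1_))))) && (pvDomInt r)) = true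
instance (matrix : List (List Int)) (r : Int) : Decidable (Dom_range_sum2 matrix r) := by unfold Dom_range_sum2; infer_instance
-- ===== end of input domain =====

-- B replaces A's O(m·n·r) per-cell row scans by a single 2D prefix-sum table with an
-- O(1) four-corner rectangle query per cell (asymptotically faster).

-- ===== PORT A =====
-- the inner loop 'for j in range(1,n): B[i][j] += B[i][j-1]' applied to one row
def aPrefixRow (n : Int) (row : List Int) : List Int :=
  (PySem.List.pyRange 1 n 1).foldl
    (fun b j => PySem.List.pySetD b j (PySem.List.pyGetD b j 0 + PySem.List.pyGetD b (j - 1) 0)) row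

-- A's nested helper 'getsum'; state = (sums, start), 'end' is recomputed each iteration
def getsumA (A : List (List Int)) (m n x y r : Int) : Int :=
  ((PySem.List.pyRange (max 0 (x - r)) (min m (x + r + 1)) 1).foldl
    (fun (st : Int × Int) i =>
      let start := if y > r then PySem.List.pyGetD (PySem.List.pyGetD A i []) (max 0 (y - r - 1)) 0 else st.2
      let e := PySem.List.pyGetD (PySem.List.pyGetD A i []) (min (n - 1) (y + r)) 0
      (st.1 + (e - start), start)) ((0 : Int), (0 : Int))).1

def range_sum2 (matrix : List (List Int)) (r : Int) : List (List Int) :=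
  let m : Int := matrix.length
  let n : Int := (PySem.List.pyGetD matrix 0 []).length
  let B : List (List Int) := matrix.map (fun row => aPrefixRow n row)
  (PySem.List.pyRange 0 m 1).map (fun i =>
    (PySem.List.pyRange 0 n 1).map (fun j => getsumA B m n i j r))

-- ===== PORT B =====
-- one new prefix-table row: cur = [0]; for j in range(n): cur.append(cur[-1]+prev[j+1]-prev[j]+row[j])
def bRowAlt (n : Int) (prev row : List Int) : List Int :=
  (PySem.List.pyRange 0 n 1).foldl
    (fun cur j => cur ++ [PySem.List.pyGetD cur (-1) 0 + PySem.List.pyGetD prev (j + 1) 0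
                          - PySem.List.pyGetD prev j 0 + PySem.List.pyGetD row j 0]) [(0 : Int)]

def range_sum2_alt (matrix : List (List Int)) (r : Int) : List (List Int) :=
  let m : Int := matrix.length
  let n : Int := (PySem.List.pyGetD matrix 0 []).length
  let P : List (List Int) := matrix.foldl
    (fun P row => P ++ [bRowAlt n (PySem.List.pyGetD P (-1) []) row])
    [List.replicate (n + 1).toNat (0 : Int)]
  (PySem.List.pyRange 0 m 1).map (fun i =>
    (PySem.List.pyRange 0 n 1).map (fun j =>
      let r1 := max 0 (i - r); let r2 := min m (i + r + 1)
      let c1 := max 0 (j - r); let c2 := min n (j + r + 1)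
      if r1 ≥ r2 ∨ c1 ≥ c2 then 0
      else PySem.List.pyGetD (PySem.List.pyGetD P r2 []) c2 0
           - PySem.List.pyGetD (PySem.List.pyGetD P r1 []) c2 0
           - PySem.List.pyGetD (PySem.List.pyGetD P r2 []) c1 0
           + PySem.List.pyGetD (PySem.List.pyGetD P r1 []) c1 0))

-- ===== PRECONDITION & SPEC =====
-- Pre_ excludes the empty matrix (A raises IndexError on matrix[0]) and matrices with a row
-- shorter than the first row: there A raises IndexError whenever r ≥ 0 and the short row is
-- reached, but for r < 0 accidentally returns an all-zero matrix because its summing loop is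
-- empty; B's prefix-table build itself raises IndexError on such ragged input.
def Pre_range_sum2 (matrix : List (List Int)) (r : Int) : Prop :=
  matrix ≠ [] ∧ ∀ row ∈ matrix, (matrix.headD []).length ≤ row.length
instance (matrix : List (List Int)) (r : Int) : Decidable (Pre_range_sum2 matrix r) := by
  unfold Pre_range_sum2; infer_instance

def pvWitness_range_sum2 : List (List Int) × Int := ([[1, 2], [3, 4]], 1)

def Spec_range_sum2 (matrix : List (List Int)) (r : Int) (out : List (List Int)) : Prop := out = range_sum2_alt matrix r
instance (matrix : List (List Int)) (r : Int) (out : List (List Int)) : Decidable (Spec_range_sum2 matrix r out) := by unfold Spec_range_sum2; infer_instance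

-- ===== CLAIM (what is proved, stated in full; the proofs are below) =====
def Claim_equal_range_sum2 : Prop := ∀ (matrix : List (List Int)) (r : Int), Dom_range_sum2 matrix r → Pre_range_sum2 matrix r → Spec_range_sum2 matrix r (range_sum2 matrix r)

-- ===== LEMMAS AND PROOFS =====

-- sum of the first t entries of a row
def pref (row : List Int) (t : Nat) : Int := (row.take t).sum

-- column-prefix: sum of 'pref row t' over the first a rows of the matrix
def colPref (matrix : List (List Int)) (a t : Nat) : Int :=
  ((matrix.take a).map (fun row => pref row t)).sum

theorem pref_zero (row : List Int) : pref row 0 = 0 := rfl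

theorem pref_succ (row : List Int) (t : Nat) (h : t < row.length) :
    pref row (t + 1) = pref row t + row.getD t 0 := by
  unfold pref
  rw [List.take_add_one, List.sum_append, List.getElem?_eq_getElem h, List.getD_eq_getElem _ _ h]
  simp

-- A's in-place row prefix loop, characterised after k iterations
theorem aPrefixRow_aux (row : List Int) :
    ∀ k : Nat, k ≤ row.length →
      ((PySem.List.pyRange 1 (k : Int) 1).foldl
        (fun b j => PySem.List.pySetD b j (PySem.List.pyGetD b j 0 + PySem.List.pyGetD b (j - 1) 0)) row).length
        = row.length ∧
      ∀ t : Nat, t < row.length →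
        ((PySem.List.pyRange 1 (k : Int) 1).foldl
          (fun b j => PySem.List.pySetD b j (PySem.List.pyGetD b j 0 + PySem.List.pyGetD b (j - 1) 0)) row).getD t 0
          = if t < k then pref row (t + 1) else row.getD t 0 := by
  intro k
  induction k with
  | zero =>
    intro _
    rw [PySem.List.pyRange_one_eq_nil (by omega)]
    refine ⟨rfl, fun t _ => ?_⟩
    simp
  | succ k ih =>
    intro hk1
    have hklen : k < row.length := by omega
    by_cases hk0 : k = 0
    · subst hk0
      rw [show ((1 : Nat) : Int) = 1 by norm_num, PySem.List.pyRange_one_eq_nil (by omega)]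
      refine ⟨rfl, fun t ht => ?_⟩
      rcases Nat.lt_or_ge t 1 with h1 | h1
      · interval_cases t
        simp [pref_succ row 0 hklen, pref_zero]
      · simp [Nat.not_lt.mpr h1]
    · have hk : 1 ≤ k := Nat.one_le_iff_ne_zero.mpr hk0
      have hsplit : PySem.List.pyRange 1 ((k + 1 : Nat) : Int) 1
          = PySem.List.pyRange 1 (k : Int) 1 ++ [(k : Int)] := by
        have : ((k + 1 : Nat) : Int) = (k : Int) + 1 := by push_cast; ring
        rw [this]
        exact PySem.List.pyRange_one_succ_right (by exact_mod_cast hk)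
      obtain ⟨hlen, hget⟩ := ih (by omega)
      rw [hsplit, List.foldl_append]
      set prev := (PySem.List.pyRange 1 (k : Int) 1).foldl
        (fun b j => PySem.List.pySetD b j (PySem.List.pyGetD b j 0 + PySem.List.pyGetD b (j - 1) 0)) row with hprev
      simp only [List.foldl_cons, List.foldl_nil]
      have hcast : ((k : Int) - 1) = ((k - 1 : Nat) : Int) := by omega
      have hv1 : PySem.List.pyGetD prev (k : Int) 0 = row.getD k 0 := by
        rw [PySem.List.pyGetD_natCast, hget k hklen]
        simp
      have hv2 : PySem.List.pyGetD prev ((k : Int) - 1) 0 = pref row k := by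
        rw [hcast, PySem.List.pyGetD_natCast, hget (k - 1) (by omega)]
        have : k - 1 < k := by omega
        simp only [this, if_pos]
        congr 1
        omega
      rw [hv1, hv2]
      refine ⟨by rw [PySem.List.length_pySetD]; exact hlen, fun t ht => ?_⟩
      rw [← PySem.List.pyGetD_natCast (PySem.List.pySetD prev (k : Int) (row.getD k 0 + pref row k)) t 0,
        PySem.List.pyGetD_pySetD_natCast prev k t _ _ (by omega), PySem.List.pyGetD_natCast]
      by_cases htk : t = k
      · subst htk
        rw [if_pos rfl, if_pos (by omega)]
        rw [pref_succ row t hklen]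
        ring
      · rw [if_neg htk, hget t ht]
        by_cases h2 : t < k
        · rw [if_pos h2, if_pos (by omega)]
        · rw [if_neg h2, if_neg (by omega)]

theorem aPrefixRow_getD (row : List Int) (nn : Nat) (h : nn ≤ row.length) (t : Nat) (ht : t < nn) :
    (aPrefixRow (nn : Int) row).getD t 0 = pref row (t + 1) := by
  have := (aPrefixRow_aux row nn h).2 t (lt_of_lt_of_le ht h)
  simpa [aPrefixRow, ht] using this

-- the (sums, start) fold of getsum, in closed form
theorem fold_pair (p : Prop) [Decidable p] (F G : Int → Int) :
    ∀ (l : List Int) (s t : Int), (¬ p → t = 0) →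
      ((l.foldl (fun (st : Int × Int) i =>
          let start := if p then G i else st.2
          let e := F i
          (st.1 + (e - start), start)) (s, t)).1)
        = s + (l.map (fun i => F i - (if p then G i else 0))).sum := by
  intro l
  induction l with
  | nil => intro s t _; simp
  | cons i l ih =>
    intro s t ht
    by_cases hp : p
    · have h2 := ih (s + (F i - G i)) (G i) (fun h => absurd hp h)
      simp only [if_pos hp] at h2 ⊢
      simp only [List.foldl_cons, List.map_cons, List.sum_cons]
      rw [h2]
      ring
    · have h2 := ih (s + (F i - t)) t ht
      simp only [if_neg hp] at h2 ⊢
      simp only [List.foldl_cons, List.map_cons, List.sum_cons]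
      rw [h2, ht hp]
      ring

theorem getsumA_eq (A : List (List Int)) (m n x y r : Int) :
    getsumA A m n x y r
      = ((PySem.List.pyRange (max 0 (x - r)) (min m (x + r + 1)) 1).map
          (fun i => PySem.List.pyGetD (PySem.List.pyGetD A i []) (min (n - 1) (y + r)) 0
            - (if y > r then PySem.List.pyGetD (PySem.List.pyGetD A i []) (max 0 (y - r - 1)) 0 else 0))).sum := by
  unfold getsumA
  rw [fold_pair (y > r)
    (fun i => PySem.List.pyGetD (PySem.List.pyGetD A i []) (min (n - 1) (y + r)) 0)
    (fun i => PySem.List.pyGetD (PySem.List.pyGetD A i []) (max 0 (y - r - 1)) 0)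
    _ 0 0 (fun _ => rfl)]
  simp

theorem bRowAlt_eq (prev row : List Int) :
    ∀ nn : Nat, nn ≤ row.length →
      bRowAlt (nn : Int) prev row
        = (List.range (nn + 1)).map (fun t => prev.getD t 0 - prev.getD 0 0 + pref row t) := by
  intro nn
  induction nn with
  | zero =>
    intro _
    simp [bRowAlt, PySem.List.pyRange_one_eq_nil (by omega : (0:Int) ≤ 0), pref_zero]
  | succ nn ih =>
    intro hlen
    have hstep : bRowAlt ((nn + 1 : Nat) : Int) prev row
        = bRowAlt (nn : Int) prev row
          ++ [PySem.List.pyGetD (bRowAlt (nn : Int) prev row) (-1) 0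
              + PySem.List.pyGetD prev ((nn : Int) + 1) 0
              - PySem.List.pyGetD prev (nn : Int) 0 + PySem.List.pyGetD row (nn : Int) 0] := by
      unfold bRowAlt
      rw [show ((nn + 1 : Nat) : Int) = (nn : Int) + 1 by push_cast; ring,
        PySem.List.pyRange_one_succ_right (by positivity), List.foldl_append]
      simp only [List.foldl_cons, List.foldl_nil]
    rw [hstep, ih (by omega)]
    have hlast : PySem.List.pyGetD
        ((List.range (nn + 1)).map (fun t => prev.getD t 0 - prev.getD 0 0 + pref row t)) (-1) 0
        = prev.getD nn 0 - prev.getD 0 0 + pref row nn := by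
      rw [List.range_succ, List.map_append]
      exact PySem.List.pyGetD_neg_one_append_singleton _ _ _
    rw [hlast, show ((nn : Int) + 1) = ((nn + 1 : Nat) : Int) by push_cast; ring,
      PySem.List.pyGetD_natCast, PySem.List.pyGetD_natCast, PySem.List.pyGetD_natCast]
    rw [show nn + 1 + 1 = (nn + 1) + 1 from rfl, List.range_succ (n := nn + 1), List.map_append]
    congr 1
    simp only [List.map_cons, List.map_nil, List.cons.injEq, and_true]
    rw [pref_succ row nn (by omega)]
    ring

-- the successive prefix-table rows built by B's fold
def chainB (nn : Int) (prev : List Int) : List (List Int) → List (List Int)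
  | [] => []
  | row :: rest => bRowAlt nn prev row :: chainB nn (bRowAlt nn prev row) rest

theorem buildP_eq (nn : Int) :
    ∀ (rows P0 : List (List Int)) (h : P0 ≠ []),
      rows.foldl (fun P row => P ++ [bRowAlt nn (PySem.List.pyGetD P (-1) []) row]) P0
        = P0 ++ chainB nn (P0.getLast h) rows := by
  intro rows
  induction rows with
  | nil => intro P0 h; simp [chainB]
  | cons row rest ih =>
    intro P0 h
    simp only [List.foldl_cons]
    rw [PySem.List.pyGetD_neg_one P0 [] h]
    rw [ih (P0 ++ [bRowAlt nn (P0.getLast h) row]) (by simp)]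
    rw [List.getLast_concat]
    rw [List.append_assoc]
    rfl

theorem chainB_getD (nn : Nat) :
    ∀ (rows : List (List Int)) (g : Nat → Int), (∀ row ∈ rows, nn ≤ row.length) → g 0 = 0 →
      ∀ k : Nat, k < rows.length →
        (chainB (nn : Int) ((List.range (nn + 1)).map g) rows).getD k []
          = (List.range (nn + 1)).map (fun t => g t + colPref rows (k + 1) t) := by
  intro rows
  induction rows with
  | nil => intro g _ _ k hk; simp at hk
  | cons row rest ih =>
    intro g hlen hg0 k hk
    have hrowlen : nn ≤ row.length := hlen row (List.mem_cons_self)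
    have hrow : bRowAlt (nn : Int) ((List.range (nn + 1)).map g) row
        = (List.range (nn + 1)).map (fun t => g t + pref row t) := by
      rw [bRowAlt_eq _ _ nn hrowlen]
      refine List.map_congr_left (fun t htm => ?_)
      have ht : t < nn + 1 := List.mem_range.mp htm
      rw [PySem.List.getD_map_range g (nn + 1) t 0 ht,
        PySem.List.getD_map_range g (nn + 1) 0 0 (by omega), hg0]
      ring
    cases k with
    | zero =>
      simp only [chainB, List.getD_cons_zero]
      rw [hrow]
      refine List.map_congr_left (fun t _ => ?_)
      simp [colPref, pref]
    | succ k =>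
      simp only [chainB, List.getD_cons_succ]
      rw [hrow]
      rw [ih (fun t => g t + pref row t) (fun r hr => hlen r (List.mem_cons_of_mem _ hr))
        (by simp [hg0, pref_zero]) k (by simpa using hk)]
      refine List.map_congr_left (fun t _ => ?_)
      simp only [colPref, List.take_succ_cons, List.map_cons, List.sum_cons]
      ring

theorem tableP_getD (matrix : List (List Int)) (nn : Nat)
    (hlen : ∀ row ∈ matrix, nn ≤ row.length) :
    ∀ i ≤ matrix.length, ∀ t ≤ nn,
      PySem.List.pyGetD (PySem.List.pyGetD
        (matrix.foldl (fun P row => P ++ [bRowAlt (nn : Int) (PySem.List.pyGetD P (-1) []) row])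
          [List.replicate (nn + 1) (0 : Int)]) (i : Int) []) (t : Int) 0
        = colPref matrix i t := by
  intro i hi t ht
  have hrep : List.replicate (nn + 1) (0 : Int) = (List.range (nn + 1)).map (fun _ => 0) := by
    simp
  rw [buildP_eq (nn : Int) matrix [List.replicate (nn + 1) (0 : Int)] (by simp)]
  rw [show ([List.replicate (nn + 1) (0 : Int)].getLast (by simp)) = List.replicate (nn + 1) (0 : Int) from rfl]
  rw [show [List.replicate (nn + 1) (0 : Int)] ++ chainB (nn : Int) (List.replicate (nn + 1) 0) matrix
      = List.replicate (nn + 1) (0 : Int) :: chainB (nn : Int) (List.replicate (nn + 1) 0) matrix from rfl]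
  rw [PySem.List.pyGetD_natCast, PySem.List.pyGetD_natCast]
  cases i with
  | zero =>
    simp only [List.getD_cons_zero]
    rw [List.getD_replicate]
    · simp [colPref]
    · omega
  | succ i =>
    simp only [List.getD_cons_succ]
    rw [hrep, chainB_getD nn matrix (fun _ => 0) hlen rfl i (by omega)]
    rw [PySem.List.getD_map_range _ (nn + 1) t 0 (by omega)]
    ring

theorem sum_map_sub (l : List Nat) (f g : Nat → Int) :
    (l.map (fun x => f x - g x)).sum = (l.map f).sum - (l.map g).sum := by
  induction l with
  | nil => simp
  | cons x l ih => simp only [List.map_cons, List.sum_cons, ih]; ring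

theorem take_window (M : List (List Int)) (a b : Nat) (hab : a ≤ b) (hb : b ≤ M.length) :
    M.take b = M.take a ++ (List.range (b - a)).map (fun k => M.getD (a + k) []) := by
  rw [show b = a + (b - a) by omega, List.take_add]
  congr 1
  apply List.ext_getElem
  · simp; omega
  · intro k h1 h2
    have hk : k < b - a := by simpa using h2
    have hak : a + k < M.length := by omega
    simp [List.getElem_take, List.getElem_drop, List.getElem?_eq_getElem hak]

theorem colPref_diff (M : List (List Int)) (a b t : Nat) (hab : a ≤ b) (hb : b ≤ M.length) :
    colPref M b t - colPref M a t
      = ((List.range (b - a)).map (fun k => pref (M.getD (a + k) []) t)).sum := by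
  unfold colPref
  rw [take_window M a b hab hb, List.map_append, List.sum_append, List.map_map]
  simp only [Function.comp_def]
  ring

theorem cellA_eq (matrix : List (List Int)) (nn : Nat)
    (hrows : ∀ row ∈ matrix, nn ≤ row.length)
    (iN jN rN : Nat) (hiN : iN < matrix.length) (hjN : jN < nn) :
    getsumA (matrix.map (fun row => aPrefixRow (nn : Int) row)) (matrix.length : Int) (nn : Int)
        (iN : Int) (jN : Int) (rN : Int)
      = colPref matrix (min matrix.length (iN + rN + 1)) (min nn (jN + rN + 1))
        - colPref matrix (iN - rN) (min nn (jN + rN + 1))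
        - colPref matrix (min matrix.length (iN + rN + 1)) (jN - rN)
        + colPref matrix (iN - rN) (jN - rN) := by
  have hn1 : 1 ≤ nn := by omega
  set r1N := iN - rN with hr1
  set r2N := min matrix.length (iN + rN + 1) with hr2
  set c1N := jN - rN with hc1
  set c2N := min nn (jN + rN + 1) with hc2
  have hr12 : r1N ≤ r2N := by omega
  have hr2m : r2N ≤ matrix.length := by omega
  rw [getsumA_eq]
  rw [show max 0 ((iN : Int) - (rN : Int)) = ((r1N : Nat) : Int) by omega]
  rw [show min ((matrix.length : Nat) : Int) ((iN : Int) + (rN : Int) + 1) = ((r2N : Nat) : Int) by omega]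
  rw [PySem.List.pyRange_one]
  rw [show (((r2N : Nat) : Int) - ((r1N : Nat) : Int)).toNat = r2N - r1N by omega]
  rw [List.map_map]
  refine Eq.trans (congrArg List.sum (List.map_congr_left
    (g := fun k => pref (matrix.getD (r1N + k) []) c2N - pref (matrix.getD (r1N + k) []) c1N)
    (fun k hk => ?_))) ?_
  · -- pointwise: each loop term is a row-window sum
    have hkr : k < r2N - r1N := List.mem_range.mp hk
    have hK : r1N + k < matrix.length := by omega
    have hKmap : r1N + k < (matrix.map (fun row => aPrefixRow (nn : Int) row)).length := by
      simpa using hK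
    simp only [Function.comp_apply]
    rw [show ((r1N : Nat) : Int) + (k : Nat) = ((r1N + k : Nat) : Int) by omega]
    have hArow : PySem.List.pyGetD (matrix.map (fun row => aPrefixRow (nn : Int) row))
        ((r1N + k : Nat) : Int) [] = aPrefixRow (nn : Int) (matrix.getD (r1N + k) []) := by
      rw [PySem.List.pyGetD_natCast, List.getD_eq_getElem _ _ hKmap, List.getElem_map,
        List.getD_eq_getElem _ _ hK]
    rw [hArow]
    have hrowmem : matrix.getD (r1N + k) [] ∈ matrix := by
      rw [List.getD_eq_getElem _ _ hK]; exact List.getElem_mem _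
    have hrowlen : nn ≤ (matrix.getD (r1N + k) []).length := hrows _ hrowmem
    rw [show min ((nn : Nat) - 1 : Int) ((jN : Int) + (rN : Int))
        = ((min (nn - 1) (jN + rN) : Nat) : Int) by omega]
    rw [PySem.List.pyGetD_natCast,
      aPrefixRow_getD _ nn hrowlen (min (nn - 1) (jN + rN)) (by omega)]
    rw [show min (nn - 1) (jN + rN) + 1 = c2N by omega]
    by_cases hyr : ((jN : Int) > (rN : Int))
    · rw [if_pos hyr]
      have hj1 : 1 ≤ jN - rN := by omega
      rw [show max 0 ((jN : Int) - (rN : Int) - 1) = ((jN - rN - 1 : Nat) : Int) by omega]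
      rw [PySem.List.pyGetD_natCast,
        aPrefixRow_getD _ nn hrowlen (jN - rN - 1) (by omega)]
      rw [show jN - rN - 1 + 1 = c1N by omega]
    · rw [if_neg hyr]
      rw [show c1N = 0 by omega, pref_zero]
  · rw [sum_map_sub,
      ← colPref_diff matrix r1N r2N c2N hr12 hr2m,
      ← colPref_diff matrix r1N r2N c1N hr12 hr2m]
    ring

theorem range_sum2_spec : Claim_equal_range_sum2 := by
  intro matrix r _hdom hpre
  obtain ⟨hne, hrows0⟩ := hpre
  have hhead : PySem.List.pyGetD matrix 0 [] = matrix.headD [] := by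
    cases matrix with
    | nil => rfl
    | cons x xs => rw [PySem.List.pyGetD_zero]; rfl
  have hrows : ∀ row ∈ matrix, (PySem.List.pyGetD matrix 0 []).length ≤ row.length := by
    intro row hr; rw [hhead]; exact hrows0 row hr
  simp only [Spec_range_sum2, range_sum2, range_sum2_alt]
  set nn := (PySem.List.pyGetD matrix 0 []).length with hnn
  refine List.map_congr_left (fun i hi => ?_)
  obtain ⟨hi0, him⟩ := PySem.List.mem_pyRange_one.mp hi
  obtain ⟨iN, rfl⟩ := Int.eq_ofNat_of_zero_le hi0
  have hiN : iN < matrix.length := by exact_mod_cast him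
  refine List.map_congr_left (fun j hj => ?_)
  obtain ⟨hj0, hjn⟩ := PySem.List.mem_pyRange_one.mp hj
  obtain ⟨jN, rfl⟩ := Int.eq_ofNat_of_zero_le hj0
  have hjN : jN < nn := by exact_mod_cast hjn
  rcases lt_or_ge r 0 with hr | hr
  · -- negative radius: A's loop range is empty and B's rectangle is empty
    rw [getsumA_eq, PySem.List.pyRange_one_eq_nil (by omega), if_pos (Or.inl (by omega))]
    simp
  · obtain ⟨rN, rfl⟩ := Int.eq_ofNat_of_zero_le hr
    rw [cellA_eq matrix nn hrows iN jN rN hiN hjN]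
    rw [if_neg (by rw [not_or]; constructor <;> omega)]
    rw [show (((nn : Nat) : Int) + 1).toNat = nn + 1 by omega]
    rw [show min ((matrix.length : Nat) : Int) ((iN : Int) + (rN : Int) + 1)
        = ((min matrix.length (iN + rN + 1) : Nat) : Int) by omega]
    rw [show max 0 ((iN : Int) - (rN : Int)) = ((iN - rN : Nat) : Int) by omega]
    rw [show min ((nn : Nat) : Int) ((jN : Int) + (rN : Int) + 1)
        = ((min nn (jN + rN + 1) : Nat) : Int) by omega]
    rw [show max 0 ((jN : Int) - (rN : Int)) = ((jN - rN : Nat) : Int) by omega]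
    rw [tableP_getD matrix nn hrows _ (by omega) _ (by omega),
      tableP_getD matrix nn hrows _ (by omega) _ (by omega),
      tableP_getD matrix nn hrows _ (by omega) _ (by omega),
      tableP_getD matrix nn hrows _ (by omega) _ (by omega)]
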